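-- pv_equiv track=rewrite | github.com/PalaashAgrawal/allmond | model/eval/eval.py | get_rolling_token_windows
-- ===== SOURCE A (Python) =====
-- def get_rolling_token_windows(token_list, prefix_token, max_seq_len, context_len):
--     """
--     - context_len allows for a rolling window context, allowing each prediction window to potentially
--     condition on some context
--
--     :param token_list: list
--         List of tokens to be PREDICTED
--     :param max_seq_len: int
--         max_seq_len of model (or max_seq_len we want to use)
--     :param context_len: int
--         Amount of desired token context for prediction. Needs to be at least 1.
--     :param prefix_token: token
--         Dummy token like <eos> so the first token has something to condition on
--     :return: generator
--         Generator of tuples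
--             (input_tokens, pred_tokens)
--         Note: Score only the last len(pred_tokens) logits of the LM
--     """
--     assert 1 <= context_len <= max_seq_len
--     if not token_list: return
--     # +1 offset, going from input->preds
--     pred_len = max_seq_len - context_len + 1
--     predicted = 0
--
--     # Special handling for first window: predict all tokens
--     first_seq_len = min(max_seq_len, len(token_list))
--     yield ([prefix_token] + token_list[: first_seq_len - 1], token_list[:first_seq_len])
--     predicted += first_seq_len
--
--     while predicted < len(token_list):
--         window_pred_len = min(len(token_list) - predicted, pred_len)
--         window_end = predicted + window_pred_len
--
--         yield (
--             token_list[window_end - max_seq_len - 1 : window_end - 1],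
--             token_list[window_end - window_pred_len : window_end],
--         )
--         predicted += window_pred_len
-- ===== SOURCE B (Python) =====
-- def get_rolling_token_windows(token_list, prefix_token, max_seq_len, context_len):
--     """Closed-form reformulation: window i (i = 0..k) ends at end_i = min(f + i*p, n)
--     over the padded sequence seq = [prefix_token] + token_list; no running state."""
--     assert 1 <= context_len <= max_seq_len
--     n = len(token_list)
--     if n == 0:
--         return
--     seq = [prefix_token] + token_list
--     f = min(max_seq_len, n)            # first window predicts all tokens it sees
--     p = max_seq_len - context_len + 1  # stride of every later window
--     k = (n - f + p - 1) // p           # number of later windows (ceiling)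
--
--     def window(i):
--         end = min(f + i * p, n)
--         plen = end if i == 0 else end - (f + (i - 1) * p)
--         return (seq[max(0, end - max_seq_len):end], seq[end - plen + 1:end + 1])
--
--     yield from map(window, range(k + 1))
-- ===== Notes on version B (the rewrite author's own statement) =====
-- stated objective: alternative
-- what changed: B replaces A's stateful while-loop (running `predicted` accumulator and special-cased first yield) by a closed-form formula: window i ends at min(f+i*p, n), the window count k is computed by ceiling division up front, and all windows are produced by mapping that formula over range(k+1) on the padded sequence [prefix_token]+token_list.
import Mathlib
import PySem

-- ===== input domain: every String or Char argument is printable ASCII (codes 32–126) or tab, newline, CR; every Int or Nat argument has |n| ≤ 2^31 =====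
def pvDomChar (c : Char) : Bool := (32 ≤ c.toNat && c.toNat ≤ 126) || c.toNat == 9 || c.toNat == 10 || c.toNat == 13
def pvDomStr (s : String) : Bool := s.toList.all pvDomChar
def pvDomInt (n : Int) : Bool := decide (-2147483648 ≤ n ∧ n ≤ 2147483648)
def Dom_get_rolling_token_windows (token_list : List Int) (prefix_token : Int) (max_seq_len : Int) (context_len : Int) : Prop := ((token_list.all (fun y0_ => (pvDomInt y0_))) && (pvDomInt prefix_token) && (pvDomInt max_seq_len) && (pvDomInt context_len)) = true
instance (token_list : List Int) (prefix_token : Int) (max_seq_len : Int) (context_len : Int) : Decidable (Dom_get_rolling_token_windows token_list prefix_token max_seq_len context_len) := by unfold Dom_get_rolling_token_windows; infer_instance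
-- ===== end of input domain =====

-- B computes each window from a closed-form formula over its index i (end_i = min(f+i*p, n)) mapped over range(k+1), replacing A's stateful while-loop; objective: alternative decomposition (same O(n) cost).
-- Both Pythons are generators; the ports return the list of yielded pairs.


-- ===== PORT A =====
-- A's while-loop; fuel (= len(token_list)) only totalizes the recursion: inside
-- Pre_ each step advances `predicted` by at least 1, so the fuel is never exhausted.
def grtwLoopA (token_list : List Int) (max_seq_len pred_len : Int) :
    Nat → Int → List (List Int × List Int)
  | 0, _ => []
  | fuel + 1, predicted =>
    if predicted < PySem.List.len token_list then
      let window_pred_len := min (PySem.List.len token_list - predicted) pred_len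
      let window_end := predicted + window_pred_len
      (PySem.List.slice token_list (some (window_end - max_seq_len - 1)) (some (window_end - 1)),
       PySem.List.slice token_list (some (window_end - window_pred_len)) (some window_end)) ::
        grtwLoopA token_list max_seq_len pred_len fuel window_end
    else []

def get_rolling_token_windows (token_list : List Int) (prefix_token : Int) (max_seq_len : Int) (context_len : Int) : List (List Int × List Int) :=
  if token_list = [] then []
  else
    let pred_len := max_seq_len - context_len + 1
    let first_seq_len := min max_seq_len (PySem.List.len token_list)
    (prefix_token :: PySem.List.slice token_list none (some (first_seq_len - 1)),
     PySem.List.slice token_list none (some first_seq_len)) ::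
      grtwLoopA token_list max_seq_len pred_len token_list.length first_seq_len

-- ===== PORT B =====
-- B's closed-form window at index i over seq = prefix_token :: token_list
def grtwWindow (seq : List Int) (n max_seq_len f p : Int) (i : Int) : List Int × List Int :=
  let e := min (f + i * p) n
  let plen := if i = 0 then e else e - (f + (i - 1) * p)
  (PySem.List.slice seq (some (max 0 (e - max_seq_len))) (some e),
   PySem.List.slice seq (some (e - plen + 1)) (some (e + 1)))

def get_rolling_token_windows_alt (token_list : List Int) (prefix_token : Int) (max_seq_len : Int) (context_len : Int) : List (List Int × List Int) :=
  let n := PySem.List.len token_list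
  if n = 0 then []
  else
    let seq := prefix_token :: token_list
    let f := min max_seq_len n
    let p := max_seq_len - context_len + 1
    let k := PySem.Int.floordiv (n - f + p - 1) p
    (PySem.List.pyRange 0 (k + 1) 1).map (grtwWindow seq n max_seq_len f p)

-- ===== PRECONDITION & SPEC =====
-- Pre_ is exactly A's `assert 1 <= context_len <= max_seq_len`: outside it A raises
-- AssertionError (and B raises the same assert).
def Pre_get_rolling_token_windows (token_list : List Int) (prefix_token : Int) (max_seq_len : Int) (context_len : Int) : Prop :=
  1 ≤ context_len ∧ context_len ≤ max_seq_len
instance (token_list : List Int) (prefix_token : Int) (max_seq_len : Int) (context_len : Int) : Decidable (Pre_get_rolling_token_windows token_list prefix_token max_seq_len context_len) := by unfold Pre_get_rolling_token_windows; infer_instance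

def pvWitness_get_rolling_token_windows : List Int × Int × Int × Int := ([3, 1, 4, 1, 5, 9, 2], 7, 4, 2)

def Spec_get_rolling_token_windows (token_list : List Int) (prefix_token : Int) (max_seq_len : Int) (context_len : Int) (out : List (List Int × List Int)) : Prop := out = get_rolling_token_windows_alt token_list prefix_token max_seq_len context_len
instance (token_list : List Int) (prefix_token : Int) (max_seq_len : Int) (context_len : Int) (out : List (List Int × List Int)) : Decidable (Spec_get_rolling_token_windows token_list prefix_token max_seq_len context_len out) := by unfold Spec_get_rolling_token_windows; infer_instance

-- ===== CLAIM (what is proved, stated in full; the proofs are below) =====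
def Claim_equal_get_rolling_token_windows : Prop := ∀ (token_list : List Int) (prefix_token : Int) (max_seq_len : Int) (context_len : Int), Dom_get_rolling_token_windows token_list prefix_token max_seq_len context_len → Pre_get_rolling_token_windows token_list prefix_token max_seq_len context_len → Spec_get_rolling_token_windows token_list prefix_token max_seq_len context_len (get_rolling_token_windows token_list prefix_token max_seq_len context_len)

-- ===== LEMMAS AND PROOFS =====

-- slicing a cons with both bounds ≥ 1 is slicing the tail with both bounds shifted down
lemma slice_cons_shift (x : Int) (xs : List Int) (a b : Int) (ha : 1 ≤ a) (hb : 1 ≤ b) :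
    PySem.List.slice (x :: xs) (some a) (some b) = PySem.List.slice xs (some (a - 1)) (some (b - 1)) := by
  rw [PySem.List.slice_toNat _ (by omega) (by omega), PySem.List.slice_toNat _ (by omega) (by omega)]
  have h1 : a.toNat = (a - 1).toNat + 1 := by omega
  have h2 : b.toNat = (b - 1).toNat + 1 := by omega
  rw [h1, h2]
  simp [List.drop_succ_cons]

-- A's while-loop started at state min(f + j*p, n) produces exactly B's windows j+1, …, k
lemma loopA_eq_map (tl : List Int) (pfx msl p f k : Int)
    (hp : 1 ≤ p) (hmsl : 1 ≤ msl)
    (hf : f = min msl (PySem.List.len tl))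
    (hk : (k - 1) * p < PySem.List.len tl - f ∧ PySem.List.len tl - f ≤ k * p) :
    ∀ (fuel : Nat) (j : Int), 0 ≤ j →
      PySem.List.len tl - (f + j * p) ≤ (fuel : Int) →
      grtwLoopA tl msl p fuel (min (f + j * p) (PySem.List.len tl)) =
        (PySem.List.pyRange (j + 1) (k + 1) 1).map
          (grtwWindow (pfx :: tl) (PySem.List.len tl) msl f p) := by
  intro fuel
  induction fuel with
  | zero =>
    intro j hj hfuel
    set n := PySem.List.len tl with hn
    have hstop : n ≤ f + j * p := by push_cast at hfuel; linarith
    have hjk : k ≤ j := by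
      have h1 : (k - 1) * p < j * p := lt_of_lt_of_le hk.1 (by linarith)
      have h2 : k - 1 < j := lt_of_mul_lt_mul_right h1 (by linarith)
      omega
    rw [min_eq_right hstop, PySem.List.pyRange_one_eq_nil (by omega : (k : Int) + 1 ≤ j + 1)]
    simp [grtwLoopA]
  | succ fuel ih =>
    intro j hj hfuel
    set n := PySem.List.len tl with hn
    by_cases hlt : f + j * p < n
    · have hjp0 : 0 ≤ j * p := mul_nonneg hj (by linarith)
      have hfn : f < n := by linarith
      have hfmsl : f = msl := by omega
      have hjk : j < k := by
        have h1 : j * p < k * p := lt_of_lt_of_le (by linarith) hk.2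
        exact lt_of_mul_lt_mul_right h1 (by linarith)
      rw [min_eq_left (le_of_lt hlt)]
      rw [PySem.List.pyRange_one_cons (by omega : (j : Int) + 1 < k + 1), List.map_cons]
      rw [grtwLoopA, if_pos hlt]
      set s := f + j * p with hs
      set wpl := min (n - s) p with hwpldef
      have hwpl1 : 1 ≤ wpl := by omega
      set we := s + wpl with hwe
      have hexp : f + (j + 1) * p = s + p := by rw [hs]; ring
      have hemin : min (f + (j + 1) * p) n = we := by rw [hexp]; omega
      have hcont : grtwLoopA tl msl p fuel we =
          (PySem.List.pyRange (j + 1 + 1) (k + 1) 1).map (grtwWindow (pfx :: tl) n msl f p) := by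
        have hb : n - (f + (j + 1) * p) ≤ (fuel : Int) := by
          rw [hexp]; push_cast at hfuel ⊢; linarith
        have h := ih (j + 1) (by omega) hb
        rw [hemin] at h
        exact h
      change ((PySem.List.slice tl (some (we - msl - 1)) (some (we - 1)),
          PySem.List.slice tl (some (we - wpl)) (some we)) ::
        grtwLoopA tl msl p fuel we) = _
      rw [hcont]
      congr 1
      unfold grtwWindow
      rw [hemin]
      simp only [if_neg (by omega : ¬ (j : Int) + 1 = 0)]
      have hplen : we - (f + (j + 1 - 1) * p) = wpl := by
        have h3 : (j + 1 - 1) * p = j * p := by ring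
        rw [h3]; omega
      rw [hplen]
      have hmax : max 0 (we - msl) = we - msl := by omega
      rw [hmax]
      congr 1
      · rw [slice_cons_shift _ _ _ _ (by omega) (by omega)]
      · rw [slice_cons_shift _ _ _ _ (by omega) (by omega)]
        have h1 : we - wpl + 1 - 1 = we - wpl := by ring
        have h2 : we + 1 - 1 = we := by ring
        rw [h1, h2]
    · have hge : n ≤ f + j * p := by linarith [not_lt.mp hlt]
      have hjk : k ≤ j := by
        have h1 : (k - 1) * p < j * p := lt_of_lt_of_le hk.1 (by linarith)
        have h2 : k - 1 < j := lt_of_mul_lt_mul_right h1 (by linarith)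
        omega
      rw [min_eq_right hge, PySem.List.pyRange_one_eq_nil (by omega : (k : Int) + 1 ≤ j + 1)]
      rw [grtwLoopA, if_neg (by omega : ¬ n < n)]
      simp

theorem grtw_eq (token_list : List Int) (prefix_token max_seq_len context_len : Int)
    (hpre : 1 ≤ context_len ∧ context_len ≤ max_seq_len) :
    get_rolling_token_windows token_list prefix_token max_seq_len context_len =
      get_rolling_token_windows_alt token_list prefix_token max_seq_len context_len := by
  simp only [get_rolling_token_windows, get_rolling_token_windows_alt]
  by_cases hnil : token_list = []
  · simp [hnil, PySem.List.len_eq]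
  · have hlen : PySem.List.len token_list = (token_list.length : Int) := PySem.List.len_eq token_list
    have hpos : 0 < token_list.length := List.length_pos_iff.mpr hnil
    set n := PySem.List.len token_list with hnd
    have hn1 : 1 ≤ n := by omega
    rw [if_neg hnil, if_neg (by omega : ¬ n = 0)]
    set p := max_seq_len - context_len + 1 with hpd
    have hp : 1 ≤ p := by omega
    set f := min max_seq_len n with hfd
    have hfn : f ≤ n := by omega
    have hf1 : 1 ≤ f := by omega
    set k := PySem.Int.floordiv (n - f + p - 1) p with hkd
    have hked : k = (n - f + p - 1) / p := PySem.Int.floordiv_eq_ediv_of_pos (by omega)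
    have hdm := Int.ediv_add_emod (n - f + p - 1) p
    have hr0 := Int.emod_nonneg (n - f + p - 1) (by omega : p ≠ 0)
    have hrp := Int.emod_lt_of_pos (n - f + p - 1) (by omega : 0 < p)
    have hkp : k * p = p * ((n - f + p - 1) / p) := by rw [hked]; ring
    have hk : (k - 1) * p < n - f ∧ n - f ≤ k * p := by
      constructor
      · have h1 : (k - 1) * p = k * p - p := by ring
        rw [h1, hkp]; linarith
      · rw [hkp]; linarith
    have hk0 : 0 ≤ k := by rw [hked]; exact Int.ediv_nonneg (by omega) (by omega)
    rw [PySem.List.pyRange_one_cons (by omega : (0 : Int) < k + 1), List.map_cons]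
    congr 1
    · -- the first window
      unfold grtwWindow
      simp only [zero_mul, add_zero, reduceIte]
      rw [min_eq_left hfn]
      have hmax : max 0 (f - max_seq_len) = 0 := by omega
      rw [hmax]
      congr 1
      · rw [show PySem.List.slice (prefix_token :: token_list) (some 0) (some f)
              = (prefix_token :: token_list).take f.toNat from by
            rw [PySem.List.slice_toNat _ (by omega) (by omega)]; simp]
        rw [show f.toNat = (f - 1).toNat + 1 from by omega]
        rw [List.take_succ_cons, PySem.List.slice_to _ (by omega)]
      · have h0 : f - f + 1 = (1 : Int) := by ring
        rw [h0, slice_cons_shift _ _ _ _ (by omega) (by omega)]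
        have h1 : (1 : Int) - 1 = 0 := by ring
        have h2 : f + 1 - 1 = f := by ring
        rw [h1, h2, PySem.List.slice_zero_start]
    · -- the remaining windows
      have hfn' : f ≤ PySem.List.len token_list := hfn
      have h := loopA_eq_map token_list prefix_token max_seq_len p f k hp (by omega)
        hfd hk token_list.length 0 le_rfl
        (by rw [PySem.List.len_eq]; simp only [zero_mul, add_zero]; omega)
      simp only [zero_mul, add_zero] at h
      rw [min_eq_left hfn'] at h
      exact h

-- ===== VERDICT (by name: the statement is the Claim_ definition above) =====
theorem get_rolling_token_windows_spec : Claim_equal_get_rolling_token_windows := by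
  intro tl pt msl cl _ hpre
  unfold Spec_get_rolling_token_windows
  exact grtw_eq tl pt msl cl hpre
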